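-- pv_equiv track=rewrite | github.com/Nikorasu/SnakeAI | snake_tutor.py | trimdeath
-- ===== SOURCE A (Python) =====
-- def trimdeath(game_data):
--     tens = 0  # this function tries to remove actions that lead up to death
--     for i in range(len(game_data)-1, -1, -1):
--         if game_data[i][2] == 10:
--             tens += 1
--             if tens == 2:
--                 return game_data[:i+1]
--     return game_data
-- ===== SOURCE B (Python) =====
-- def trimdeath(game_data):
--     # One forward pass collecting every index whose third component is 10,
--     # then a single slice at the second-to-last such index.
--     marks = [i for i in range(len(game_data)) if game_data[i][2] == 10]
--     if len(marks) >= 2: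
--         return game_data[:marks[-2] + 1]
--     return game_data
-- ===== Notes on version B (the rewrite author's own statement) =====
-- stated objective: alternative
-- what changed: Replaces A's backward scan with a count-to-2 early exit by a single forward pass building the list of all marker indices, followed by one slice at the second-to-last collected index.
import Mathlib
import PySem

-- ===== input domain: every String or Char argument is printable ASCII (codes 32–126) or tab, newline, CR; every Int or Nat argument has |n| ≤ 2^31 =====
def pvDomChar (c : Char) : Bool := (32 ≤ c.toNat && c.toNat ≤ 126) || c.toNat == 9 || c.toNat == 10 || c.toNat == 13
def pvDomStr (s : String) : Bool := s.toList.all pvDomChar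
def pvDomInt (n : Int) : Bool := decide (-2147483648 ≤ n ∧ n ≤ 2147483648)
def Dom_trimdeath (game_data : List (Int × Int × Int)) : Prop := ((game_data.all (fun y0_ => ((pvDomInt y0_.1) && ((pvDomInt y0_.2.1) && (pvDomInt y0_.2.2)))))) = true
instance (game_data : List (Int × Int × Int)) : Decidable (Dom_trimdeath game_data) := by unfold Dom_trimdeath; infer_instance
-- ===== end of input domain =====

-- B: single forward pass collecting all marker indices, then one slice at the second-to-last one (alternative decomposition, same cost).

-- ===== PORT A =====
-- A's loop over range(len-1, -1, -1) with the early `return` becomes structural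
-- recursion over the pyRange list carrying the `tens` counter.
-- game_data[i] is ported with pyGetD: every index the loop visits is in range,
-- so the default is never used and the port is exact.
def trimdeathAux (gd : List (Int × Int × Int)) : List Int → Int → List (Int × Int × Int)
  | [], _ => gd
  | i :: rest, tens =>
    if ((PySem.List.pyGetD gd i (0, 0, 0)).2.2) == 10 then
      if tens + 1 == 2 then PySem.List.slice gd none (some (i + 1))
      else trimdeathAux gd rest (tens + 1)
    else trimdeathAux gd rest tens

def trimdeath (game_data : List (Int × Int × Int)) : List (Int × Int × Int) :=
  trimdeathAux game_data (PySem.List.pyRange ((game_data.length : Int) - 1) (-1) (-1)) 0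

-- ===== PORT B =====
-- the comprehension over range(len(gd)) is a filter on the pyRange list;
-- gd[i] is again exact via pyGetD (all indices in range).
def trimdeath_alt (game_data : List (Int × Int × Int)) : List (Int × Int × Int) :=
  let marks := (PySem.List.pyRange 0 (game_data.length : Int) 1).filter
      (fun i => ((PySem.List.pyGetD game_data i (0, 0, 0)).2.2) == 10)
  if marks.length ≥ 2 then
    PySem.List.slice game_data none (some (PySem.List.pyGetD marks (-2) 0 + 1))
  else game_data

-- ===== PRECONDITION & SPEC =====
def Spec_trimdeath (game_data : List (Int × Int × Int)) (out : List (Int × Int × Int)) : Prop := out = trimdeath_alt game_data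
instance (game_data : List (Int × Int × Int)) (out : List (Int × Int × Int)) : Decidable (Spec_trimdeath game_data out) := by unfold Spec_trimdeath; infer_instance

-- ===== CLAIM (what is proved, stated in full; the proofs are below) =====
def Claim_equal_trimdeath : Prop := ∀ (game_data : List (Int × Int × Int)), Dom_trimdeath game_data → Spec_trimdeath game_data (trimdeath game_data)

-- ===== LEMMAS AND PROOFS =====

-- With tens = 1, the loop returns the slice at the FIRST marker index of the remaining list.
theorem trimdeathAux_one (gd : List (Int × Int × Int)) (is : List Int) :
    trimdeathAux gd is 1 =
      match is.filter (fun i => ((PySem.List.pyGetD gd i (0, 0, 0)).2.2) == 10) with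
      | [] => gd
      | i :: _ => PySem.List.slice gd none (some (i + 1)) := by
  induction is with
  | nil => simp [trimdeathAux]
  | cons i rest ih =>
    by_cases h : ((PySem.List.pyGetD gd i (0, 0, 0)).2.2) == 10
    · simp [trimdeathAux, h]
    · simp [trimdeathAux, h, ih]

-- With tens = 0, the loop returns the slice at the SECOND marker index of the list.
theorem trimdeathAux_zero (gd : List (Int × Int × Int)) (is : List Int) :
    trimdeathAux gd is 0 =
      match is.filter (fun i => ((PySem.List.pyGetD gd i (0, 0, 0)).2.2) == 10) with
      | _ :: i :: _ => PySem.List.slice gd none (some (i + 1))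
      | _ => gd := by
  induction is with
  | nil => simp [trimdeathAux]
  | cons i rest ih =>
    by_cases h : ((PySem.List.pyGetD gd i (0, 0, 0)).2.2) == 10
    · cases hfr : rest.filter (fun i => ((PySem.List.pyGetD gd i (0, 0, 0)).2.2) == 10) with
      | nil => simp [trimdeathAux, h, trimdeathAux_one, hfr]
      | cons j t => simp [trimdeathAux, h, trimdeathAux_one, hfr]
    · simp [trimdeathAux, h, ih]

-- ===== VERDICT (by name: the statement is the Claim_ definition above) =====
theorem trimdeath_spec : Claim_equal_trimdeath := by
  intro gd _
  unfold Spec_trimdeath trimdeath trimdeath_alt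
  set sel : Int → Bool := fun i => ((PySem.List.pyGetD gd i (0, 0, 0)).2.2) == 10 with hsel
  have hrange : PySem.List.pyRange ((gd.length : Int) - 1) (-1) (-1)
      = (PySem.List.pyRange 0 (gd.length : Int) 1).reverse := by
    rw [PySem.List.pyRange_neg_one_eq_reverse]
    norm_num
  rw [hrange, trimdeathAux_zero, List.filter_reverse]
  set F : List Int := (PySem.List.pyRange 0 (gd.length : Int) 1).filter sel with hF
  match hrev : F.reverse with
  | [] =>
    have hlen : F.length = 0 := by
      have := congrArg List.length hrev; simpa using this
    simp [hlen]
  | [a] =>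
    have hlen : F.length = 1 := by
      have := congrArg List.length hrev; simpa using this
    simp [hlen]
  | a :: i :: rest =>
    have hlen : F.length = rest.length + 2 := by
      have := congrArg List.length hrev
      simp at this; omega
    have h2 : 2 ≤ F.length := by omega
    have hFeq : F = rest.reverse ++ [i, a] := by
      have := congrArg List.reverse hrev; simpa using this
    have hi : F[F.length - 2]'(by omega) = i := by
      simp only [hFeq]
      rw [List.getElem_append_right (by simp)]
      simp
    have hget : PySem.List.pyGetD F (-2) 0 = F[F.length - 2]'(by omega) := by
      rw [PySem.List.pyGetD_neg_ofNat F 2 0 (by omega) h2]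
    simp only [if_pos h2, hget, hi]
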